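-- pv_equiv track=rewrite | github.com/dlanier/pipe_tools | ParserIndictment/womtool_template_fill_in.py | configure_json_dict
-- ===== SOURCE A (Python) =====
-- from collections import OrderedDict, defaultdict, Counter
--
-- def get_json_keys_config_dict(json_dict):
--     """ Usage:    keys_dict = get_json_keys_config_dict(json_dict)
--
--     Args:
--         json_dict:      json template file as python dict
--
--     Returns:
--         keys_dict:      key is righmost member of json key
--                         value is list of json keys in the input dict
--     """
--     keys_dict = defaultdict(list)
--     for k, v in json_dict.items():
--         k_list = k.split('.')
--         keys_dict[k_list[-1]].append(k)
--
--     return keys_dict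
--
-- def configure_json_dict(json_dict, config_dict):
--     """ Usage:
--     configured_dict, json_missing_dict, config_used_dict = configure_json_dict(json_dict, config_dict)
--
--     Args:
--         json_dict:          python dict from json template file
--         config_dict:        python dict from config.txt file intended to fill in the json template
--
--     Returns:
--         configured_dict:    json dict keys: config dict values
--         json_missing_dict:  keys: value (= types)  for json dict keys not found in config dict
--         config_used_dict:   the config file key-value pairs used
--     """
--     configured_dict = defaultdict()
--     json_missing_dict = defaultdict()
--     config_used_dict = defaultdict()
--     json_keys_counter = Counter(json_dict.keys())
--
--     keys_d = get_json_keys_config_dict(json_dict)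
--
--     #                              put the config dict values in the json file full-key
--     for k, v in config_dict.items():
--         if k in keys_d:
--             config_used_dict[k] = v
--
--             for var_name in keys_d[k]:
--                 if len(v) > 2 and v[0:2] == '""':
--                     v_fixed = '"' + '\\' + '"'
--                     v_fixed += v[2:-2]
--                     v_fixed += '"' + '\\'  + '"'
--                     configured_dict[var_name] = v_fixed
--                 else:
--                     configured_dict[var_name] = v.strip()
--
--                 json_keys_counter[var_name] += 1
--
--     for k, v in json_keys_counter.items():
--         if v < 2:
--             json_missing_dict[k] = json_dict[k]
--
--     return configured_dict, json_missing_dict, config_used_dict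
-- ===== SOURCE B (Python) =====
-- def configure_json_dict(json_dict, config_dict):
--     """Same result as A: one pass over config_dict matching last key segments,
--     missing keys computed directly by segment membership (no Counter)."""
--     segs = [(k.split('.')[-1], k) for k in json_dict]
--     configured = {}
--     config_used = {}
--     for ck, cv in config_dict.items():
--         matched = [full for seg, full in segs if seg == ck]
--         if matched:
--             config_used[ck] = cv
--             if len(cv) > 2 and cv[:2] == '""':
--                 val = '"\\"' + cv[2:-2] + '"\\"'
--             else:
--                 val = cv.strip()
--             for full in matched:
--                 configured[full] = val
--     json_missing = {k: v for k, v in json_dict.items()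
--                     if k.split('.')[-1] not in config_dict}
--     return configured, json_missing, config_used
-- ===== Notes on version B (the rewrite author's own statement) =====
-- stated objective: alternative
-- what changed: B drops A's Counter bookkeeping entirely: it matches each config key against a once-computed (segment, key) list and derives the missing-keys dict directly by segment membership in config_dict, computing the filled value once per config key instead of once per json key.
import Mathlib
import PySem

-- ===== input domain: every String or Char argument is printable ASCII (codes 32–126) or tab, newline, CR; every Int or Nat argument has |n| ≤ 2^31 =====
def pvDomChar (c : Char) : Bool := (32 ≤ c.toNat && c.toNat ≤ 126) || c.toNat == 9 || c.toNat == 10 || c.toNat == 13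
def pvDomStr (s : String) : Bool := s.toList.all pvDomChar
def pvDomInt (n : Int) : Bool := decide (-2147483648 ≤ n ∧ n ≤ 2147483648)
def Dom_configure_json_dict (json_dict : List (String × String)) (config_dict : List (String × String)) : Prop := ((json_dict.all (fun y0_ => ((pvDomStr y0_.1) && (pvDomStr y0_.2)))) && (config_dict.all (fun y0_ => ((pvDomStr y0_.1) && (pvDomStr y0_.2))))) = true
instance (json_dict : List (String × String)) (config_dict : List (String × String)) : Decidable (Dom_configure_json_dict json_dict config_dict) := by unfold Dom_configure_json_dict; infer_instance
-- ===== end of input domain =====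

-- ===== PORT A =====
-- B replaces A's Counter-based missing-key bookkeeping by a direct membership test; return-value equivalence (alternative decomposition, no speed claim).
-- last segment of a dotted key: k.split('.')[-1]  (split('.') is never empty, so [-1] never raises)
def pvLastSeg (k : String) : String :=
  String.ofList (((PySem.Chars.splitOn k.toList ['.']).getLast?).getD [])

-- get_json_keys_config_dict: defaultdict(list); keys_dict[k_list[-1]].append(k)
def pvKeysD (json_dict : List (String × String)) : PySem.Dict String (List String) :=
  json_dict.foldl (fun d kv =>
    let s := pvLastSeg kv.1
    d.insert s (d.getD s [] ++ [kv.1])) PySem.Dict.empty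

-- A's '""'-quoted value: '"'+'\\'+'"' + v[2:-2] + '"'+'\\'+'"' (string concat ported on List Char, as PYSEM directs)
def pvFixA (v : String) : String :=
  String.ofList (((['"'] ++ ['\\'] ++ ['"']) ++ PySem.Chars.slice v.toList (some 2) (some (-2)))
    ++ (['"'] ++ ['\\'] ++ ['"']))

def configure_json_dict (json_dict : List (String × String)) (config_dict : List (String × String)) :
    (List (String × String)) × (List (String × String)) × (List (String × String)) :=
  let keys_d := pvKeysD json_dict
  let counter0 : PySem.Dict String Int := PySem.Dict.counter (json_dict.map (·.1))
  -- for k, v in config_dict.items(): … (state: configured_dict, config_used_dict, json_keys_counter)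
  let st := config_dict.foldl
    (fun (st : PySem.Dict String String × PySem.Dict String String × PySem.Dict String Int) kv =>
      if keys_d.contains kv.1 then
        let used := st.2.1.insert kv.1 kv.2
        -- for var_name in keys_d[k]: … (state: configured_dict, json_keys_counter)
        let inner := (keys_d.getD kv.1 []).foldl
          (fun (p : PySem.Dict String String × PySem.Dict String Int) var_name =>
            let conf :=
              if decide (2 < PySem.Str.len kv.2)
                  && (PySem.Chars.slice kv.2.toList (some 0) (some 2) == ['"', '"']) then
                p.1.insert var_name (pvFixA kv.2)
              else
                p.1.insert var_name (PySem.Str.strip kv.2)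
            (conf, p.2.modify var_name 0 (· + 1))) (st.1, st.2.2)
        (inner.1, used, inner.2)
      else st)
    (PySem.Dict.empty, PySem.Dict.empty, counter0)
  -- for k, v in json_keys_counter.items(): if v < 2: json_missing_dict[k] = json_dict[k]
  let jdict : PySem.Dict String String := PySem.Dict.mk json_dict  -- json_dict IS a dict; its association list viewed as one
  let missing := st.2.2.items.foldl
    (fun (d : PySem.Dict String String) kv =>
      if kv.2 < 2 then d.insert kv.1 (jdict.getD kv.1 "") else d) PySem.Dict.empty
  (st.1.items, missing.items, st.2.1.items)

-- ===== PORT B =====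
-- B's '""'-quoted value: '"\\"' + cv[2:-2] + '"\\"'
def pvFixB (v : String) : String :=
  String.ofList (['"', '\\', '"'] ++ (PySem.Chars.slice v.toList (some 2) (some (-2)) ++ ['"', '\\', '"']))

def configure_json_dict_alt (json_dict : List (String × String)) (config_dict : List (String × String)) :
    (List (String × String)) × (List (String × String)) × (List (String × String)) :=
  -- segs = [(k.split('.')[-1], k) for k in json_dict]
  let segs := json_dict.map (fun kv => (pvLastSeg kv.1, kv.1))
  -- for ck, cv in config_dict.items(): … (state: configured, config_used)
  let st := config_dict.foldl
    (fun (st : PySem.Dict String String × PySem.Dict String String) kv =>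
      let matched := (segs.filter (fun p => p.1 == kv.1)).map (·.2)
      if matched.isEmpty then st
      else
        let used := st.2.insert kv.1 kv.2
        let val :=
          if decide (2 < PySem.Str.len kv.2)
              && (PySem.Chars.slice kv.2.toList none (some 2) == ['"', '"']) then
            pvFixB kv.2
          else PySem.Str.strip kv.2
        (matched.foldl (fun c full => c.insert full val) st.1, used))
    (PySem.Dict.empty, PySem.Dict.empty)
  -- missing = {k: v for k, v in json_dict if k.split('.')[-1] not in config_dict}
  let missing := json_dict.foldl
    (fun (d : PySem.Dict String String) kv =>
      if config_dict.any (fun c => c.1 == pvLastSeg kv.1) then d else d.insert kv.1 kv.2)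
    PySem.Dict.empty
  (st.1.items, missing.items, st.2.items)

-- ===== PRECONDITION & SPEC =====
-- The association lists encode Python dicts, whose keys are distinct; a list with duplicate
-- keys has no Python-dict counterpart, so Pre_ requires distinct keys in both arguments.
def Pre_configure_json_dict (json_dict : List (String × String)) (config_dict : List (String × String)) : Prop :=
  (json_dict.map Prod.fst).Nodup ∧ (config_dict.map Prod.fst).Nodup
instance (json_dict : List (String × String)) (config_dict : List (String × String)) : Decidable (Pre_configure_json_dict json_dict config_dict) := by unfold Pre_configure_json_dict; infer_instance

def pvWitness_configure_json_dict : (List (String × String)) × (List (String × String)) :=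
  ([("wf.task.cpu", "Int"), ("wf.mem", "String")], [("cpu", " 4 "), ("disk", "\"\"d\"\"")])

def Spec_configure_json_dict (json_dict : List (String × String)) (config_dict : List (String × String)) (out : (List (String × String)) × (List (String × String)) × (List (String × String))) : Prop := out = configure_json_dict_alt json_dict config_dict
instance (json_dict : List (String × String)) (config_dict : List (String × String)) (out : (List (String × String)) × (List (String × String)) × (List (String × String))) : Decidable (Spec_configure_json_dict json_dict config_dict out) := by unfold Spec_configure_json_dict; infer_instance

-- ===== CLAIM (what is proved, stated in full; the proofs are below) =====
def Claim_equal_configure_json_dict : Prop := ∀ (json_dict : List (String × String)) (config_dict : List (String × String)), Dom_configure_json_dict json_dict config_dict → Pre_configure_json_dict json_dict config_dict → Spec_configure_json_dict json_dict config_dict (configure_json_dict json_dict config_dict)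

-- ===== LEMMAS AND PROOFS =====

-- json keys whose last segment is s, in json order
def pvF (jd : List (String × String)) (s : String) : List String :=
  (jd.map (·.1)).filter (fun k => pvLastSeg k == s)

-- B's matched list for config key s
def pvMatch (jd : List (String × String)) (s : String) : List String :=
  ((jd.map (fun kv => (pvLastSeg kv.1, kv.1))).filter (fun p => p.1 == s)).map (·.2)

-- the '""'-branch conditions of the two ports
def pvCond (v : String) : Bool :=
  decide (2 < PySem.Str.len v) && (PySem.Chars.slice v.toList (some 0) (some 2) == ['"', '"'])
def pvCondB (v : String) : Bool :=
  decide (2 < PySem.Str.len v) && (PySem.Chars.slice v.toList none (some 2) == ['"', '"'])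

-- component step functions the two config loops decompose into
def pvCA (jd : List (String × String)) (c : PySem.Dict String String) (kv : String × String) :
    PySem.Dict String String :=
  if (pvKeysD jd).contains kv.1 then
    ((pvKeysD jd).getD kv.1 []).foldl
      (fun c var => c.insert var (if pvCond kv.2 then pvFixA kv.2 else PySem.Str.strip kv.2)) c
  else c

def pvUA (jd : List (String × String)) (u : PySem.Dict String String) (kv : String × String) :
    PySem.Dict String String :=
  if (pvKeysD jd).contains kv.1 then u.insert kv.1 kv.2 else u

def pvTA (jd : List (String × String)) (t : PySem.Dict String Int) (kv : String × String) :
    PySem.Dict String Int :=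
  if (pvKeysD jd).contains kv.1 then
    ((pvKeysD jd).getD kv.1 []).foldl (fun t var => t.modify var 0 (· + 1)) t
  else t

def pvCB (jd : List (String × String)) (c : PySem.Dict String String) (kv : String × String) :
    PySem.Dict String String :=
  if (pvMatch jd kv.1).isEmpty then c
  else (pvMatch jd kv.1).foldl
    (fun c full => c.insert full (if pvCondB kv.2 then pvFixB kv.2 else PySem.Str.strip kv.2)) c

def pvUB (jd : List (String × String)) (u : PySem.Dict String String) (kv : String × String) :
    PySem.Dict String String :=
  if (pvMatch jd kv.1).isEmpty then u else u.insert kv.1 kv.2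

lemma pvFix_eq (v : String) : pvFixA v = pvFixB v := by
  simp [pvFixA, pvFixB]

lemma pvCond_eq (v : String) : pvCond v = pvCondB v := by
  simp [pvCond, pvCondB, PySem.List.slice_zero_start]

lemma pvF_cons (kv : String × String) (tl : List (String × String)) (s : String) :
    pvF (kv :: tl) s = if pvLastSeg kv.1 == s then kv.1 :: pvF tl s else pvF tl s := by
  simp only [pvF, List.map_cons, List.filter_cons]

lemma pvMatch_eq (jd : List (String × String)) (s : String) : pvMatch jd s = pvF jd s := by
  simp [pvMatch, pvF, List.filter_map, List.map_map, Function.comp_def]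

lemma dict_contains_eq (d : PySem.Dict String (List String)) (k : String) :
    d.contains k = (d.get? k).isSome := by
  simp [PySem.Dict.contains, PySem.Dict.get?, List.isSome_find?]

lemma keysD_fold_get? (jd : List (String × String)) (s : String) :
    ∀ d : PySem.Dict String (List String),
      ((jd.foldl (fun d kv =>
          let t := pvLastSeg kv.1
          d.insert t (d.getD t [] ++ [kv.1])) d).get? s) =
        if pvF jd s = [] then d.get? s else some (d.getD s [] ++ pvF jd s) := by
  induction jd with
  | nil => intro d; simp [pvF]
  | cons kv tl ih =>
    intro d
    simp only [List.foldl_cons]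
    rw [ih]
    by_cases h : pvLastSeg kv.1 = s
    · rw [pvF_cons]
      simp only [h, beq_self_eq_true, if_true]
      rw [PySem.Dict.get?_insert_self, PySem.Dict.getD_insert]
      split
      · simp_all
      · simp_all
    · have hne : s ≠ pvLastSeg kv.1 := fun e => h e.symm
      rw [pvF_cons]
      simp only [beq_iff_eq, h, if_false]
      rw [PySem.Dict.get?_insert_of_ne _ _ hne, PySem.Dict.getD_insert]
      simp [hne]

lemma keysD_get? (jd : List (String × String)) (s : String) :
    (pvKeysD jd).get? s = if pvF jd s = [] then none else some (pvF jd s) := by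
  unfold pvKeysD
  rw [keysD_fold_get? jd s PySem.Dict.empty]
  simp [PySem.Dict.empty, PySem.Dict.get?, PySem.Dict.getD]

lemma keysD_contains (jd : List (String × String)) (s : String) :
    (pvKeysD jd).contains s = !(pvF jd s).isEmpty := by
  rw [dict_contains_eq, keysD_get?]
  split <;> simp_all

lemma keysD_getD (jd : List (String × String)) (s : String) (h : ¬ pvF jd s = []) :
    (pvKeysD jd).getD s [] = pvF jd s := by
  simp [PySem.Dict.getD, keysD_get?, h]

lemma inner_split (kv : String × String) (l : List String) :
    ∀ (c : PySem.Dict String String) (t : PySem.Dict String Int),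
      l.foldl (fun (p : PySem.Dict String String × PySem.Dict String Int) var_name =>
          (if decide (2 < PySem.Str.len kv.2)
              && (PySem.Chars.slice kv.2.toList (some 0) (some 2) == ['"', '"']) then
            p.1.insert var_name (pvFixA kv.2)
          else p.1.insert var_name (PySem.Str.strip kv.2),
          p.2.modify var_name 0 (· + 1))) (c, t) =
      (l.foldl (fun c var =>
          c.insert var (if pvCond kv.2 then pvFixA kv.2 else PySem.Str.strip kv.2)) c,
        l.foldl (fun t var => t.modify var 0 (· + 1)) t) := by
  induction l with
  | nil => intro c t; rfl
  | cons x l ih =>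
    intro c t
    simp only [List.foldl_cons]
    rw [ih]
    congr 1
    unfold pvCond
    split <;> rfl

lemma foldA_eq (jd cd : List (String × String)) :
    ∀ (conf used : PySem.Dict String String) (ctr : PySem.Dict String Int),
      cd.foldl
        (fun (st : PySem.Dict String String × PySem.Dict String String × PySem.Dict String Int) kv =>
          if (pvKeysD jd).contains kv.1 then
            ((((pvKeysD jd).getD kv.1 []).foldl
                (fun (p : PySem.Dict String String × PySem.Dict String Int) var_name =>
                  (if decide (2 < PySem.Str.len kv.2)
                      && (PySem.Chars.slice kv.2.toList (some 0) (some 2) == ['"', '"']) then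
                    p.1.insert var_name (pvFixA kv.2)
                  else p.1.insert var_name (PySem.Str.strip kv.2),
                  p.2.modify var_name 0 (· + 1))) (st.1, st.2.2)).1,
              st.2.1.insert kv.1 kv.2,
              (((pvKeysD jd).getD kv.1 []).foldl
                (fun (p : PySem.Dict String String × PySem.Dict String Int) var_name =>
                  (if decide (2 < PySem.Str.len kv.2)
                      && (PySem.Chars.slice kv.2.toList (some 0) (some 2) == ['"', '"']) then
                    p.1.insert var_name (pvFixA kv.2)
                  else p.1.insert var_name (PySem.Str.strip kv.2),
                  p.2.modify var_name 0 (· + 1))) (st.1, st.2.2)).2)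
          else st) (conf, used, ctr) =
      (cd.foldl (pvCA jd) conf, cd.foldl (pvUA jd) used, cd.foldl (pvTA jd) ctr) := by
  induction cd with
  | nil => intro conf used ctr; rfl
  | cons c cd ih =>
    intro conf used ctr
    simp only [List.foldl_cons]
    rw [← ih]
    congr 1
    by_cases h : (pvKeysD jd).contains c.1
    · simp only [h, if_true]
      rw [inner_split c]
      simp [pvCA, pvUA, pvTA, h]
    · simp only [Bool.not_eq_true] at h
      simp [pvCA, pvUA, pvTA, h]

lemma foldB_eq (jd cd : List (String × String)) :
    ∀ (conf used : PySem.Dict String String),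
      cd.foldl
        (fun (st : PySem.Dict String String × PySem.Dict String String) kv =>
          if (((jd.map (fun kv => (pvLastSeg kv.1, kv.1))).filter
                (fun p => p.1 == kv.1)).map (·.2)).isEmpty then st
          else
            ((((jd.map (fun kv => (pvLastSeg kv.1, kv.1))).filter
                (fun p => p.1 == kv.1)).map (·.2)).foldl
              (fun c full => c.insert full
                (if decide (2 < PySem.Str.len kv.2)
                    && (PySem.Chars.slice kv.2.toList none (some 2) == ['"', '"']) then
                  pvFixB kv.2
                else PySem.Str.strip kv.2)) st.1,
              st.2.insert kv.1 kv.2)) (conf, used) =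
      (cd.foldl (pvCB jd) conf, cd.foldl (pvUB jd) used) := by
  induction cd with
  | nil => intro conf used; rfl
  | cons c cd ih =>
    intro conf used
    simp only [List.foldl_cons]
    rw [← ih]
    congr 1
    by_cases h : (pvMatch jd c.1).isEmpty
    · simp only [pvMatch] at h
      simp [pvCB, pvUB, pvMatch, h]
    · simp only [pvMatch] at h
      simp [pvCB, pvUB, pvMatch, pvCondB, h]

lemma stepCAB_eq (jd : List (String × String)) : pvCA jd = pvCB jd := by
  funext c kv
  unfold pvCA pvCB
  rw [keysD_contains, pvMatch_eq]
  by_cases h : pvF jd kv.1 = []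
  · simp [h]
  · have hfun : (fun (c : PySem.Dict String String) var =>
        c.insert var (if pvCond kv.2 then pvFixA kv.2 else PySem.Str.strip kv.2)) =
        (fun (c : PySem.Dict String String) full =>
          c.insert full (if pvCondB kv.2 then pvFixB kv.2 else PySem.Str.strip kv.2)) := by
      funext c var
      rw [pvCond_eq, pvFix_eq]
    rw [keysD_getD jd kv.1 h, hfun]
    simp [h]

lemma stepUAB_eq (jd : List (String × String)) : pvUA jd = pvUB jd := by
  funext u kv
  unfold pvUA pvUB
  rw [keysD_contains, pvMatch_eq]
  by_cases h : pvF jd kv.1 = [] <;> simp [h]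

lemma find?_key (jd : List (String × String)) (hj : (jd.map (·.1)).Nodup)
    (kv : String × String) (hm : kv ∈ jd) :
    jd.find? (fun p => p.1 == kv.1) = some kv := by
  induction jd with
  | nil => cases hm
  | cons a tl ih =>
    simp only [List.map_cons, List.nodup_cons] at hj
    rcases List.mem_cons.mp hm with h | h
    · subst h; simp [List.find?_cons_of_pos]
    · have hne : (a.1 == kv.1) = false := by
        simp only [beq_eq_false_iff_ne, ne_eq]
        intro e
        exact hj.1 (e ▸ List.mem_map_of_mem h)
      rw [List.find?_cons_of_neg (by simp [hne])]
      exact ih hj.2 h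

lemma find?_map_key (jd : List (String × String)) (g : String → Int) (m : String)
    (hm : m ∈ jd.map (·.1)) :
    (jd.map (fun kv => (kv.1, g kv.1))).find? (fun p => p.1 == m) = some (m, g m) := by
  induction jd with
  | nil => cases hm
  | cons a tl ih =>
    by_cases h : a.1 = m
    · subst h
      simp [List.find?_cons_of_pos]
    · rw [List.map_cons, List.find?_cons_of_neg (by simp [h])]
      apply ih
      rcases List.mem_map.mp hm with ⟨x, hx, e⟩
      rcases List.mem_cons.mp hx with rfl | hx'
      · exact absurd e h
      · exact e ▸ List.mem_map_of_mem hx'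

lemma contains_mk_of_mem (L : List (String × Int)) (m : String) (hm : m ∈ L.map (·.1)) :
    (PySem.Dict.mk L).contains m = true := by
  rcases List.mem_map.mp hm with ⟨x, hx, e⟩
  simp only [PySem.Dict.contains]
  rw [List.any_eq_true]
  exact ⟨x, hx, by simp [e]⟩

lemma modify_mk (jd : List (String × String)) (g : String → Int) (m : String)
    (hm : m ∈ jd.map (·.1)) :
    (PySem.Dict.mk (jd.map (fun kv => (kv.1, g kv.1)))).modify m 0 (· + 1) =
      PySem.Dict.mk (jd.map (fun kv => (kv.1, if kv.1 == m then g kv.1 + 1 else g kv.1))) := by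
  have hm' : m ∈ (jd.map (fun kv => (kv.1, g kv.1))).map (·.1) := by
    simpa [List.map_map, Function.comp] using hm
  unfold PySem.Dict.modify
  rw [show (PySem.Dict.mk (jd.map (fun kv => (kv.1, g kv.1)))).getD m 0 = g m from ?_]
  · unfold PySem.Dict.insert
    rw [if_pos (contains_mk_of_mem _ m hm')]
    congr 1
    simp only [List.map_map]
    apply List.map_congr_left
    intro kv _
    by_cases h : kv.1 = m
    · simp [Function.comp, h]
    · simp [Function.comp, h]
  · simp [PySem.Dict.getD, PySem.Dict.get?, find?_map_key jd g m hm]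

lemma bump_fold (jd : List (String × String)) :
    ∀ (ms : List String) (g : String → Int), (∀ m ∈ ms, m ∈ jd.map (·.1)) →
      ms.foldl (fun t var => t.modify var 0 (· + 1))
          (PySem.Dict.mk (jd.map (fun kv => (kv.1, g kv.1)))) =
        PySem.Dict.mk (jd.map (fun kv => (kv.1, g kv.1 + (ms.count kv.1 : Int)))) := by
  intro ms
  induction ms with
  | nil => intro g _; simp
  | cons m ms ih =>
    intro g hsub
    simp only [List.foldl_cons]
    rw [modify_mk jd g m (hsub m List.mem_cons_self)]
    have := ih (fun k => if k == m then g k + 1 else g k) (fun x hx => hsub x (List.mem_cons_of_mem _ hx))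
    simp only [] at this
    rw [this]
    congr 1
    apply List.map_congr_left
    intro kv _
    by_cases h : kv.1 = m
    · simp [h]
      ring
    · simp [h, Ne.symm h]

lemma counter0_eq (jd : List (String × String)) (hj : (jd.map (·.1)).Nodup) :
    PySem.Dict.counter (jd.map (·.1)) =
      PySem.Dict.mk (jd.map (fun kv => (kv.1, (1 : Int)))) := by
  apply PySem.Dict.ext
  rw [PySem.Dict.items_counter, PySem.Set.ofList_eq_self_of_nodup _ hj]
  simp only [List.map_map]
  apply List.map_congr_left
  intro kv hk
  simp [Function.comp, List.count_eq_one_of_mem hj (List.mem_map_of_mem hk)]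

lemma mem_pvF (jd : List (String × String)) (s k : String) :
    k ∈ pvF jd s ↔ k ∈ jd.map (·.1) ∧ pvLastSeg k = s := by
  simp [pvF, List.mem_filter]

lemma count_pvF (jd : List (String × String)) (hj : (jd.map (·.1)).Nodup)
    (s : String) (kv : String × String) (hm : kv ∈ jd) :
    ((pvF jd s).count kv.1 : Int) = if pvLastSeg kv.1 = s then 1 else 0 := by
  by_cases h : pvLastSeg kv.1 = s
  · rw [if_pos h]
    unfold pvF
    rw [List.count_filter (by simp [h])]
    rw [List.count_eq_one_of_mem hj (List.mem_map_of_mem hm)]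
    rfl
  · rw [if_neg h]
    have : kv.1 ∉ pvF jd s := fun hc => h ((mem_pvF jd s kv.1).mp hc).2
    simp [List.count_eq_zero_of_not_mem this]

lemma ctr_fold (jd : List (String × String)) (hj : (jd.map (·.1)).Nodup) :
    ∀ (cd : List (String × String)) (g : String → Int),
      cd.foldl (pvTA jd) (PySem.Dict.mk (jd.map (fun kv => (kv.1, g kv.1)))) =
        PySem.Dict.mk (jd.map (fun kv =>
          (kv.1, g kv.1 + ((cd.map (·.1)).count (pvLastSeg kv.1) : Int)))) := by
  intro cd
  induction cd with
  | nil => intro g; simp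
  | cons c cd ih =>
    intro g
    simp only [List.foldl_cons]
    by_cases h : pvF jd c.1 = []
    · rw [show pvTA jd (PySem.Dict.mk (jd.map (fun kv => (kv.1, g kv.1)))) c =
          PySem.Dict.mk (jd.map (fun kv => (kv.1, g kv.1))) from by
        unfold pvTA; rw [keysD_contains]; simp [h]]
      rw [ih g]
      congr 1
      apply List.map_congr_left
      intro kv hk
      have hne : pvLastSeg kv.1 ≠ c.1 := by
        intro e
        have : kv.1 ∈ pvF jd c.1 :=
          (mem_pvF jd c.1 kv.1).mpr ⟨List.mem_map_of_mem hk, e⟩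
        rw [h] at this
        cases this
      simp only [List.map_cons, List.count_cons]
      have : (c.1 == pvLastSeg kv.1) = false := by simp [Ne.symm hne]
      simp [this]
    · rw [show pvTA jd (PySem.Dict.mk (jd.map (fun kv => (kv.1, g kv.1)))) c =
          PySem.Dict.mk (jd.map (fun kv =>
            (kv.1, g kv.1 + ((pvF jd c.1).count kv.1 : Int)))) from by
        unfold pvTA
        rw [keysD_contains]
        have h1 : (pvF jd c.1).isEmpty = false := by simp [h]
        rw [h1]
        simp only [Bool.not_false, if_true]
        rw [keysD_getD jd c.1 h]
        exact bump_fold jd (pvF jd c.1) g (fun m hm => ((mem_pvF jd c.1 m).mp hm).1)]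
      have := ih (fun k => g k + ((pvF jd c.1).count k : Int))
      simp only [] at this
      rw [this]
      congr 1
      apply List.map_congr_left
      intro kv hk
      rw [count_pvF jd hj c.1 kv hk]
      simp only [List.map_cons, List.count_cons]
      by_cases he : pvLastSeg kv.1 = c.1
      · have : (c.1 == pvLastSeg kv.1) = true := by simp [he]
        simp [he]
        ring
      · have : (c.1 == pvLastSeg kv.1) = false := by simp [Ne.symm he]
        simp [this, he]

lemma missing_eq (jd cd : List (String × String)) (hj : (jd.map (·.1)).Nodup) :
    (cd.foldl (pvTA jd) (PySem.Dict.counter (jd.map (·.1)))).items.foldl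
        (fun (d : PySem.Dict String String) kv =>
          if kv.2 < 2 then d.insert kv.1 ((PySem.Dict.mk jd).getD kv.1 "") else d)
        PySem.Dict.empty =
      jd.foldl
        (fun (d : PySem.Dict String String) kv =>
          if cd.any (fun c => c.1 == pvLastSeg kv.1) then d else d.insert kv.1 kv.2)
        PySem.Dict.empty := by
  rw [counter0_eq jd hj]
  have h1 := ctr_fold jd hj cd (fun _ => (1 : Int))
  simp only [] at h1
  rw [h1]
  simp only [List.foldl_map]
  apply PySem.List.foldl_congr_mem
  intro acc kv hk
  have hval : (PySem.Dict.mk jd).getD kv.1 "" = kv.2 := by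
    simp [PySem.Dict.getD, PySem.Dict.get?, find?_key jd hj kv hk]
  by_cases hany : cd.any (fun c => c.1 == pvLastSeg kv.1)
  · have hcnt : 0 < (cd.map (·.1)).count (pvLastSeg kv.1) := by
      rcases List.any_eq_true.mp hany with ⟨cc, hc, he⟩
      exact List.count_pos_iff.mpr (beq_iff_eq.mp he ▸ List.mem_map_of_mem hc)
    rw [if_pos hany, if_neg (by omega)]
  · have hcnt : (cd.map (·.1)).count (pvLastSeg kv.1) = 0 := by
      rw [List.count_eq_zero]
      intro hc
      rcases List.mem_map.mp hc with ⟨c, hc', e⟩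
      exact hany (List.any_eq_true.mpr ⟨c, hc', by simp [e]⟩)
    rw [if_neg hany, if_pos (by rw [hcnt]; norm_num), hval]

-- ===== VERDICT (by name: the statement is the Claim_ definition above) =====
theorem configure_json_dict_spec : Claim_equal_configure_json_dict := by
  intro jd cd _hdom hpre
  show configure_json_dict jd cd = configure_json_dict_alt jd cd
  unfold configure_json_dict configure_json_dict_alt
  simp only []
  rw [foldA_eq jd cd, foldB_eq jd cd, stepCAB_eq jd, stepUAB_eq jd, missing_eq jd cd hpre.1]
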